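-- pv_equiv track=rewrite | github.com/caporali/computational_laboratory | code/code_tsp/main/function.py | find_two_change
-- ===== SOURCE A (Python) =====
-- import itertools as it
--
-- def find_two_change(prob, n):
-- 	c = -1
-- 	flag = 0
-- 	for alpha in range (0, n):
-- 		if (alpha + 3 >= n):
-- 			for beta in range ((alpha + 3)%n, alpha):
-- 				c = c + 1
-- 				if c == prob:
-- 					flag = 1
-- 					break
-- 		else:
-- 			#it.chain() unisce e concatena i due range
-- 			for beta in it.chain(range (alpha + 3, n), range (0, alpha)):
-- 				c = c + 1
-- 				if c == prob:
-- 					flag = 1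
-- 					break
-- 		if (flag == 1):
-- 			break
--
-- 	return alpha, beta
-- ===== SOURCE B (Python) =====
-- def find_two_change(prob, n):
-- 	# Direct un-ranking: each alpha owns exactly n-3 consecutive ranks,
-- 	# and within a block the betas are alpha+3, alpha+4, ... taken modulo n.
-- 	alpha, r = divmod(prob, n - 3)
-- 	return alpha, (alpha + 3 + r) % n
-- ===== Notes on version B (the rewrite author's own statement) =====
-- stated objective: faster
-- what changed: Replaces the nested enumeration loops (count up to the prob-th pair) by O(1) arithmetic un-ranking: alpha = prob // (n-3) and beta = (alpha + 3 + prob % (n-3)) % n.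
-- intended difference: For prob outside the valid rank range [0, n*(n-3)) A falls through its loops and returns the leftover loop variables (n-1, n-2), while B returns the arithmetic un-ranking of prob (floor-division extends the formula), which is the intended value of the formula rather than stale loop state. — e.g. on find_two_change(-1, 4): A returns (3, 2), B returns (-1, 2)
-- outside the precondition, e.g. on find_two_change(0, 2): A returns (1, 0), B returns (0, 1); on find_two_change(5, 2): A returns (1, 0), B returns (-5, 0); on find_two_change(0, 3): A raises UnboundLocalError, B raises ZeroDivisionError
import Mathlib
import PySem

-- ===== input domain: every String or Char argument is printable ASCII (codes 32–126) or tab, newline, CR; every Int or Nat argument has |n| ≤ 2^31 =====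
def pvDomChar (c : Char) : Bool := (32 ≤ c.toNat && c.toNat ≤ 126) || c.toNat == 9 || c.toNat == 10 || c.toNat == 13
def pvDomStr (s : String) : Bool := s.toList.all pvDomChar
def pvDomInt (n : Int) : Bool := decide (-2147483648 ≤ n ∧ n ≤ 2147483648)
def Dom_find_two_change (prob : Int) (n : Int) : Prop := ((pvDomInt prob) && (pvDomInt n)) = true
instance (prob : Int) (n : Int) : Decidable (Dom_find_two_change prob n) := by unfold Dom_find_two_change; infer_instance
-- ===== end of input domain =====

-- B replaces A's nested counting loops by O(1) arithmetic un-ranking (divmod + mod).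

-- ===== PORT A =====
-- the inner beta range of one alpha iteration (the two branches of A, kept verbatim)
def pvBetasA (n : Int) (alpha : Int) : List Int :=
  if alpha + 3 ≥ n then
    PySem.List.pyRange (PySem.Int.mod (alpha + 3) n) alpha 1
  else
    PySem.List.pyRange (alpha + 3) n 1 ++ PySem.List.pyRange 0 alpha 1

-- inner 'for beta in …' loop: counts c up, breaks (flag = true) when c == prob;
-- returns (c, flag, beta) with beta the last bound value (b0 if the range was empty)
def pvInnerA (prob : Int) : List Int → Int → Int → Int × Bool × Int
  | [], c, b0 => (c, false, b0)
  | b :: rest, c, _ => if c + 1 = prob then (c + 1, true, b) else pvInnerA prob rest (c + 1) b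

-- outer 'for alpha in range(0, n)' loop; a0/b0 carry the last bound alpha/beta
-- (Python would raise UnboundLocalError if they are never bound; 0 stands for 'unbound',
-- reachable only outside Pre_)
def pvOuterA (prob : Int) (n : Int) : List Int → Int → Int → Int → Int × Int
  | [], _, a0, b0 => (a0, b0)
  | a :: rest, c, _, b0 =>
      let t := pvInnerA prob (pvBetasA n a) c b0
      if t.2.1 then (a, t.2.2) else pvOuterA prob n rest t.1 a t.2.2

def find_two_change (prob : Int) (n : Int) : Int × Int :=
  pvOuterA prob n (PySem.List.pyRange 0 n 1) (-1) 0 0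

-- ===== PORT B =====
def find_two_change_alt (prob : Int) (n : Int) : Int × Int :=
  match PySem.Int.divmod? prob (n - 3) with
  | none => (0, 0)   -- ZeroDivisionError (n = 3), outside Pre_
  | some (alpha, r) => (alpha, PySem.Int.mod (alpha + 3 + r) n)

-- ===== PRECONDITION & SPEC =====
-- Pre_ excludes n ≤ 3: there A raises UnboundLocalError (beta never bound), except n = 2
-- where A's constant answer alpha=1, beta=0 is leftover loop state of a degenerate enumeration
-- with no valid 2-opt pairs (and B raises ZeroDivisionError at n = 3).
def Pre_find_two_change (prob : Int) (n : Int) : Prop := 4 ≤ n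
instance (prob : Int) (n : Int) : Decidable (Pre_find_two_change prob n) := by unfold Pre_find_two_change; infer_instance
def pvWitness_find_two_change : Int × Int := (0, 5)

-- For prob outside the valid rank range [0, n*(n-3)) A falls through its loops and returns
-- the leftover loop variables (n-1, n-2), while B returns the arithmetic un-ranking of prob,
-- the intended value of the formula rather than stale loop state.
def D_find_two_change (prob : Int) (n : Int) : Prop := prob < 0 ∨ n * (n - 3) ≤ prob
instance (prob : Int) (n : Int) : Decidable (D_find_two_change prob n) := by unfold D_find_two_change; infer_instance

def Spec_find_two_change (prob : Int) (n : Int) (out : Int × Int) : Prop := ¬ D_find_two_change prob n → out = find_two_change_alt prob n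
instance (prob : Int) (n : Int) (out : Int × Int) : Decidable (Spec_find_two_change prob n out) := by unfold Spec_find_two_change; infer_instance

def pvDiffWitness_find_two_change : Int × Int := (-1, 4)
def pvDiffWitnessOut_find_two_change : (Int × Int) × (Int × Int) := ((3, 2), (-1, 2))

-- ===== CLAIM (what is proved, stated in full; the proofs are below) =====
def Claim_unchanged_find_two_change : Prop := ∀ (prob : Int) (n : Int), Dom_find_two_change prob n → Pre_find_two_change prob n → Spec_find_two_change prob n (find_two_change prob n)
def Claim_changed_find_two_change : Prop := Dom_find_two_change (pvDiffWitness_find_two_change.1) (pvDiffWitness_find_two_change.2) ∧ Pre_find_two_change (pvDiffWitness_find_two_change.1) (pvDiffWitness_find_two_change.2) ∧ D_find_two_change (pvDiffWitness_find_two_change.1) (pvDiffWitness_find_two_change.2) ∧ find_two_change (pvDiffWitness_find_two_change.1) (pvDiffWitness_find_two_change.2) = pvDiffWitnessOut_find_two_change.1 ∧ find_two_change_alt (pvDiffWitness_find_two_change.1) (pvDiffWitness_find_two_change.2) = pvDiffWitnessOut_find_two_change.2 ∧ pvDiffWitnessOut_find_two_change.1 ≠ pvDiffWitnessOut_find_t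wo_change.2
def Claim_exact_find_two_change : Prop := ∀ (prob : Int) (n : Int), Dom_find_two_change prob n → Pre_find_two_change prob n → D_find_two_change prob n → find_two_change prob n ≠ find_two_change_alt prob n

-- ===== LEMMAS AND PROOFS =====

-- inner loop hits: if prob is exactly k+1 steps ahead, it breaks on element k
theorem pvInnerA_hit (prob : Int) : ∀ (bs : List Int) (c b0 : Int) (k : Nat)
    (hk : k < bs.length), prob = c + 1 + k →
    pvInnerA prob bs c b0 = (prob, true, bs.getD k 0) := by
  intro bs
  induction bs with
  | nil => intro c b0 k hk; simp at hk
  | cons b rest ih =>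
    intro c b0 k hk hp
    cases k with
    | zero =>
      have hc1 : c + 1 = prob := by push_cast at hp; omega
      simp only [pvInnerA, List.getD_cons_zero, hc1]
      simp
    | succ k' =>
      have hne : ¬ (c + 1 = prob) := by omega
      simp only [pvInnerA, if_neg hne, List.getD_cons_succ]
      exact ih (c + 1) b k' (by simpa using hk) (by push_cast at hp ⊢; omega)

-- inner loop misses: counter passes over the whole range
theorem pvInnerA_miss (prob : Int) : ∀ (bs : List Int) (c b0 : Int),
    (prob ≤ c ∨ c + (bs.length : Int) < prob) →
    pvInnerA prob bs c b0 = (c + bs.length, false, bs.getLastD b0) := by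
  intro bs
  induction bs with
  | nil => intro c b0 _; simp [pvInnerA]
  | cons b rest ih =>
    intro c b0 h
    have hne : ¬ (c + 1 = prob) := by
      rcases h with h | h
      · omega
      · simp at h; omega
    simp only [pvInnerA, if_neg hne, List.getLastD_cons]
    have h' : prob ≤ c + 1 ∨ c + 1 + (rest.length : Int) < prob := by
      rcases h with h | h
      · left; omega
      · right; simp only [List.length_cons] at h; push_cast at h ⊢; omega
    rw [ih (c + 1) b h']
    exact Prod.ext (by simp only [List.length_cons]; push_cast; omega) rfl

-- the beta range of alpha a has length n-3 and k-th element (a+3+k) mod n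
theorem pvBetasA_length {n a : Int} (h4 : 4 ≤ n) (h0 : 0 ≤ a) (hn : a < n) :
    (pvBetasA n a).length = (n - 3).toNat := by
  unfold pvBetasA
  split_ifs with h
  · have : PySem.Int.mod (a + 3) n = a + 3 - n := by
      rw [PySem.Int.mod_eq_emod_of_pos (by omega), ← Int.sub_emod_right (a + 3) n,
        Int.emod_eq_of_lt (by omega) (by omega)]
    rw [this, PySem.List.length_pyRange_one]; omega
  · simp [PySem.List.length_pyRange_one]; omega

theorem pvBetasA_getD {n a : Int} (h4 : 4 ≤ n) (h0 : 0 ≤ a) (hn : a < n)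
    (k : Nat) (hk : (k : Int) < n - 3) :
    (pvBetasA n a).getD k 0 = if a + 3 + k < n then a + 3 + k else a + 3 + k - n := by
  unfold pvBetasA
  split_ifs with h hlt hlt
  · -- wrap branch, a+3+k < n : impossible since a+3 ≥ n
    omega
  · have hm : PySem.Int.mod (a + 3) n = a + 3 - n := by
      rw [PySem.Int.mod_eq_emod_of_pos (by omega), ← Int.sub_emod_right (a + 3) n,
        Int.emod_eq_of_lt (by omega) (by omega)]
    rw [hm]
    rw [List.getD_eq_getElem _ _ (by rw [PySem.List.length_pyRange_one]; omega)]
    rw [PySem.List.getElem_pyRange_one]; omega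
  · -- chain branch, first part
    have hk1 : k < (PySem.List.pyRange (a + 3) n 1).length := by
      rw [PySem.List.length_pyRange_one]; omega
    rw [List.getD_eq_getElem _ _ (by simp; omega)]
    rw [List.getElem_append_left hk1, PySem.List.getElem_pyRange_one]
  · -- chain branch, second part
    have hlen1 : (PySem.List.pyRange (a + 3) n 1).length = (n - a - 3).toNat := by
      rw [PySem.List.length_pyRange_one]; omega
    rw [List.getD_eq_getElem _ _ (by simp [PySem.List.length_pyRange_one]; omega)]
    rw [List.getElem_append_right (by omega)]
    rw [PySem.List.getElem_pyRange_one]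
    push_cast [hlen1]; omega

theorem pyRange_getLastD : ∀ (m : Nat) (a b d : Int), (b - a).toNat = m → a < b →
    (PySem.List.pyRange a b 1).getLastD d = b - 1 := by
  intro m
  induction m with
  | zero => intro a b d hm hab; omega
  | succ m ih =>
    intro a b d hm hab
    rw [PySem.List.pyRange_one_cons hab, List.getLastD_cons]
    by_cases h : a + 1 < b
    · exact ih (a + 1) b a (by omega) h
    · have : b ≤ a + 1 := by omega
      rw [PySem.List.pyRange_one_eq_nil this]; simp; omega

-- outer loop, hit case: starting at alpha = a ≤ q with counter a*(n-3)-1 the loop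
-- stops at alpha = q, beta = (q+3+r) mod n
theorem pvOuterA_hit {prob n q r : Int} (h4 : 4 ≤ n)
    (hq0 : 0 ≤ q) (hqn : q < n) (hr0 : 0 ≤ r) (hrn : r < n - 3)
    (hp : prob = q * (n - 3) + r) :
    ∀ (m : Nat) (a c a0 b0 : Int), (n - a).toNat = m → 0 ≤ a → a ≤ q →
    c = a * (n - 3) - 1 →
    pvOuterA prob n (PySem.List.pyRange a n 1) c a0 b0
      = (q, (pvBetasA n q).getD r.toNat 0) := by
  intro m
  induction m with
  | zero => intro a c a0 b0 hm h0 haq hc; omega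
  | succ m ih =>
    intro a c a0 b0 hm h0 haq hc
    rw [PySem.List.pyRange_one_cons (by omega)]
    by_cases hEq : a = q
    · subst hEq
      have hhit := pvInnerA_hit prob (pvBetasA n a) c b0 r.toNat
        (by rw [pvBetasA_length h4 h0 (by omega)]; omega)
        (by push_cast; omega)
      simp only [pvOuterA, hhit]
      simp
    · have hcast : (((n - 3).toNat : Int)) = n - 3 := by omega
      have hmiss := pvInnerA_miss prob (pvBetasA n a) c b0
        (by
          right
          rw [pvBetasA_length h4 h0 (by omega), hcast]
          have h1 : (a + 1) * (n - 3) ≤ q * (n - 3) :=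
            Int.mul_le_mul_of_nonneg_right (by omega) (by omega)
          nlinarith)
      simp only [pvOuterA, hmiss]
      rw [if_neg (by simp)]
      refine ih (a + 1) _ a _ (by omega) (by omega) (by omega) ?_
      rw [pvBetasA_length h4 h0 (by omega)]
      have hexp : (a + 1) * (n - 3) = a * (n - 3) + (n - 3) := by ring
      omega

-- outer loop, miss case: the whole enumeration is exhausted and the leftover pair is (n-1, n-2)
theorem pvOuterA_miss {prob n : Int} (h4 : 4 ≤ n)
    (hD : prob < 0 ∨ n * (n - 3) ≤ prob) :
    ∀ (m : Nat) (a c a0 b0 : Int), (n - a).toNat = m → 0 ≤ a → a < n →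
    c = a * (n - 3) - 1 →
    pvOuterA prob n (PySem.List.pyRange a n 1) c a0 b0 = (n - 1, n - 2) := by
  intro m
  induction m with
  | zero => intro a c a0 b0 hm h0 han hc; omega
  | succ m ih =>
    intro a c a0 b0 hm h0 han hc
    rw [PySem.List.pyRange_one_cons (by omega)]
    have hcast : (((n - 3).toNat : Int)) = n - 3 := by omega
    have hmiss := pvInnerA_miss prob (pvBetasA n a) c b0
      (by
        rw [pvBetasA_length h4 h0 han, hcast]
        rcases hD with h | h
        · left
          have := mul_nonneg h0 (by omega : (0 : Int) ≤ n - 3)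
          omega
        · right
          have h1 : (a + 1) * (n - 3) ≤ n * (n - 3) :=
            Int.mul_le_mul_of_nonneg_right (by omega) (by omega)
          nlinarith)
    simp only [pvOuterA, hmiss]
    rw [if_neg (by simp)]
    by_cases hlast : a + 1 < n
    · refine ih (a + 1) _ a _ (by omega) (by omega) hlast ?_
      rw [pvBetasA_length h4 h0 han]
      have hexp : (a + 1) * (n - 3) = a * (n - 3) + (n - 3) := by ring
      omega
    · -- a = n - 1 : the list ahead is empty; the returned beta is the last beta of this row
      have hend : PySem.List.pyRange (a + 1) n 1 = [] := PySem.List.pyRange_one_eq_nil (by omega)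
      rw [hend]
      simp only [pvOuterA]
      have ha : a = n - 1 := by omega
      subst ha
      have hb : pvBetasA n (n - 1) = PySem.List.pyRange 2 (n - 1) 1 := by
        unfold pvBetasA
        rw [if_pos (by omega)]
        have : PySem.Int.mod (n - 1 + 3) n = 2 := by
          rw [PySem.Int.mod_eq_emod_of_pos (by omega), ← Int.sub_emod_right (n - 1 + 3) n,
            Int.emod_eq_of_lt (by omega) (by omega)]
          omega
        rw [this]
      rw [hb, pyRange_getLastD (n - 3).toNat 2 (n - 1) b0 (by omega) (by omega)]
      simp; omega

-- B's port, spelled out for n ≥ 4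
theorem alt_eq {prob n : Int} (h4 : 4 ≤ n) :
    find_two_change_alt prob n
      = (PySem.Int.floordiv prob (n - 3),
         PySem.Int.mod (PySem.Int.floordiv prob (n - 3) + 3 + PySem.Int.mod prob (n - 3)) n) := by
  unfold find_two_change_alt
  simp [PySem.Int.divmod?, show n - 3 ≠ 0 by omega, PySem.Int.floordiv, PySem.Int.mod]

-- the un-ranked quotient/remainder are in range when 0 ≤ prob < n*(n-3)
theorem q_bounds {prob n : Int} (h4 : 4 ≤ n) (h0 : 0 ≤ prob) (hn : prob < n * (n - 3)) :
    0 ≤ PySem.Int.floordiv prob (n - 3) ∧ PySem.Int.floordiv prob (n - 3) < n := by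
  have hb : (0 : Int) < n - 3 := by omega
  obtain ⟨h1, h2⟩ := (PySem.Int.floordiv_eq_iff_of_pos hb).1 (rfl : PySem.Int.floordiv prob (n - 3) = _)
  constructor
  · by_contra h
    push_neg at h
    nlinarith
  · by_contra h
    push_neg at h
    nlinarith

theorem find_two_change_spec : Claim_unchanged_find_two_change := by
  intro prob n _ hPre
  unfold Spec_find_two_change
  intro hnD
  have h4 : 4 ≤ n := hPre
  unfold D_find_two_change at hnD
  push_neg at hnD
  obtain ⟨h0, hlt⟩ := hnD
  have hb : (0 : Int) < n - 3 := by omega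
  set q := PySem.Int.floordiv prob (n - 3) with hqdef
  set r := PySem.Int.mod prob (n - 3) with hrdef
  have hqr : q * (n - 3) + r = prob := PySem.Int.floordiv_mul_add_mod prob (n - 3)
  have hr0 : 0 ≤ r := PySem.Int.mod_nonneg prob hb
  have hrn : r < n - 3 := PySem.Int.mod_lt prob hb
  obtain ⟨hq0, hqn⟩ := q_bounds h4 h0 hlt
  unfold find_two_change
  rw [pvOuterA_hit h4 hq0 hqn hr0 hrn hqr.symm n.toNat 0 (-1) 0 0 (by omega) (by omega)
        (by omega) (by omega)]
  rw [alt_eq h4, ← hqdef, ← hrdef]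
  have hget := pvBetasA_getD h4 hq0 hqn r.toNat (by omega)
  have hrcast : ((r.toNat : Int)) = r := by omega
  rw [hrcast] at hget
  rw [hget]
  have hmod : PySem.Int.mod (q + 3 + r) n
      = if q + 3 + r < n then q + 3 + r else q + 3 + r - n := by
    rw [PySem.Int.mod_eq_emod_of_pos (by omega)]
    split_ifs with h
    · exact Int.emod_eq_of_lt (by omega) h
    · rw [← Int.sub_emod_right (q + 3 + r) n, Int.emod_eq_of_lt (by omega) (by omega)]
  rw [hmod]

theorem find_two_change_tight : Claim_exact_find_two_change := by
  intro prob n _ hPre hD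
  have h4 : 4 ≤ n := hPre
  have hD' : prob < 0 ∨ n * (n - 3) ≤ prob := hD
  have hb : (0 : Int) < n - 3 := by omega
  unfold find_two_change
  rw [pvOuterA_miss h4 hD' n.toNat 0 (-1) 0 0 (by omega) (by omega) (by omega) (by omega)]
  rw [alt_eq h4]
  obtain ⟨h1, h2⟩ := (PySem.Int.floordiv_eq_iff_of_pos hb).1
    (rfl : PySem.Int.floordiv prob (n - 3) = _)
  intro h
  have hfst : n - 1 = PySem.Int.floordiv prob (n - 3) := congrArg Prod.fst h
  rcases hD' with hneg | hbig
  · nlinarith [hfst ▸ h1]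
  · nlinarith [hfst ▸ h2]

-- ===== VERDICT (by name: the statement is the Claim_ definition above) =====
theorem find_two_change_changed : Claim_changed_find_two_change := by
  unfold Claim_changed_find_two_change; decide
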